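-- pv_equiv track=rewrite | github.com/kevin-ch-day/ScytaleDroid | scytaledroid/StaticAnalysis/modules/permissions/simple.py | _group_trigger_debug
-- ===== SOURCE A (Python) =====
-- from typing import Dict, List, Sequence, Tuple, Mapping, Optional
--
-- _GROUP_ORDER = (
--     "LOC",  # Location
--     "CAM",  # Camera
--     "MIC",  # Microphone
--     "CNT",  # Contacts/Accounts
--     "PHN",  # Phone
--     "SMS",  # SMS
--     "STR",  # Storage/Media
--     "BT",   # Bluetooth/Nearby
--     "OVR",  # Overlay
--     "NOT",  # Notifications
--     "ADS",  # Ads/Attribution (vendor)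
-- )
--
-- def _group_trigger_debug(
--     declared: Sequence[Tuple[str, str]],
--     protection_map: Mapping[str, Optional[str]],
-- ) -> Dict[str, Dict[str, List[str]]]:
--     """Return group -> {strong: [...], weak: [...]} for debugging footprint.
--
--     Mirrors the mapping rules in analysis/signals.py to show which permissions
--     contributed to each capability and with what strength.
--     """
--     out: Dict[str, Dict[str, List[str]]] = {k: {"strong": [], "weak": []} for k in _GROUP_ORDER}
--
--     def _tag(key: str, short: str, strong: bool) -> None:
--         bucket = "strong" if strong else "weak"
--         if short not in out[key][bucket]:
--             out[key][bucket].append(short)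
--
--     for name, _tagtype in declared:
--         is_framework = name.startswith("android.")
--         short = name.split(".")[-1].upper()
--         prot = (protection_map.get(short) or "").lower()
--         is_ds = prot in {"dangerous", "signature"}
--
--         s = short
--         # Location
--         if s == "ACCESS_BACKGROUND_LOCATION":
--             _tag("LOC", s, True)
--         if s in {"ACCESS_FINE_LOCATION", "ACCESS_COARSE_LOCATION", "ACCESS_MEDIA_LOCATION"}:
--             _tag("LOC", s, is_ds)
--         # Camera / Mic
--         if s == "CAMERA":
--             _tag("CAM", s, True)
--         if s in {"RECORD_AUDIO", "CAPTURE_AUDIO_OUTPUT"}: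
--             _tag("MIC", s, True)
--         # Contacts/Accounts
--         if s in {"READ_CONTACTS", "WRITE_CONTACTS", "GET_ACCOUNTS", "MANAGE_ACCOUNTS"}:
--             _tag("CNT", s, is_ds)
--         # Phone / SMS
--         if s in {"READ_CALL_LOG", "CALL_PHONE", "READ_PHONE_STATE", "READ_PHONE_NUMBERS", "ANSWER_PHONE_CALLS"}:
--             _tag("PHN", s, is_ds)
--         if s in {"SEND_SMS", "RECEIVE_SMS", "READ_SMS", "RECEIVE_MMS", "RECEIVE_WAP_PUSH"}:
--             _tag("SMS", s, is_ds)
--         # Storage/Media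
--         if "READ_MEDIA_" in s or s in {"READ_EXTERNAL_STORAGE", "WRITE_EXTERNAL_STORAGE", "MANAGE_EXTERNAL_STORAGE"}:
--             _tag("STR", s, is_ds or s == "MANAGE_EXTERNAL_STORAGE")
--         # Bluetooth/Nearby
--         if s in {"BLUETOOTH_SCAN", "BLUETOOTH_ADVERTISE", "BLUETOOTH_CONNECT", "NEARBY_WIFI_DEVICES"}:
--             _tag("BT", s, is_ds)
--         # Overlay/Notifications
--         if s in {"SYSTEM_ALERT_WINDOW", "SYSTEM_OVERLAY_WINDOW"}:
--             _tag("OVR", s, True)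
--         if s in {"POST_NOTIFICATIONS", "BIND_NOTIFICATION_LISTENER_SERVICE", "ACCESS_NOTIFICATION_POLICY"}:
--             _tag("NOT", s, is_ds)
--
--     return out
-- ===== SOURCE B (Python) =====
-- # B: instead of a branch cascade mutating the dict per permission, build a tag
-- # list via one reverse-index table lookup (plus the READ_MEDIA_ substring rule),
-- # then assemble the per-group dedup'd buckets with comprehensions.
-- _GROUP_ORDER = (
--     "LOC", "CAM", "MIC", "CNT", "PHN", "SMS", "STR", "BT", "OVR", "NOT", "ADS",
-- )
--
-- # exact short-name -> (group, strength mode); mode "strong" = always strong,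
-- # mode "ds" = strong iff protection level is dangerous/signature.
-- _EXACT = {
--     "ACCESS_BACKGROUND_LOCATION": ("LOC", "strong"),
--     "ACCESS_FINE_LOCATION": ("LOC", "ds"),
--     "ACCESS_COARSE_LOCATION": ("LOC", "ds"),
--     "ACCESS_MEDIA_LOCATION": ("LOC", "ds"),
--     "CAMERA": ("CAM", "strong"),
--     "RECORD_AUDIO": ("MIC", "strong"),
--     "CAPTURE_AUDIO_OUTPUT": ("MIC", "strong"),
--     "READ_CONTACTS": ("CNT", "ds"),
--     "WRITE_CONTACTS": ("CNT", "ds"),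
--     "GET_ACCOUNTS": ("CNT", "ds"),
--     "MANAGE_ACCOUNTS": ("CNT", "ds"),
--     "READ_CALL_LOG": ("PHN", "ds"),
--     "CALL_PHONE": ("PHN", "ds"),
--     "READ_PHONE_STATE": ("PHN", "ds"),
--     "READ_PHONE_NUMBERS": ("PHN", "ds"),
--     "ANSWER_PHONE_CALLS": ("PHN", "ds"),
--     "SEND_SMS": ("SMS", "ds"),
--     "RECEIVE_SMS": ("SMS", "ds"),
--     "READ_SMS": ("SMS", "ds"),
--     "RECEIVE_MMS": ("SMS", "ds"),
--     "RECEIVE_WAP_PUSH": ("SMS", "ds"),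
--     "READ_EXTERNAL_STORAGE": ("STR", "ds"),
--     "WRITE_EXTERNAL_STORAGE": ("STR", "ds"),
--     "MANAGE_EXTERNAL_STORAGE": ("STR", "strong"),
--     "BLUETOOTH_SCAN": ("BT", "ds"),
--     "BLUETOOTH_ADVERTISE": ("BT", "ds"),
--     "BLUETOOTH_CONNECT": ("BT", "ds"),
--     "NEARBY_WIFI_DEVICES": ("BT", "ds"),
--     "SYSTEM_ALERT_WINDOW": ("OVR", "strong"),
--     "SYSTEM_OVERLAY_WINDOW": ("OVR", "strong"),
--     "POST_NOTIFICATIONS": ("NOT", "ds"),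
--     "BIND_NOTIFICATION_LISTENER_SERVICE": ("NOT", "ds"),
--     "ACCESS_NOTIFICATION_POLICY": ("NOT", "ds"),
-- }
--
-- def _group_trigger_debug(declared, protection_map):
--     tags = []
--     for name, _tagtype in declared:
--         short = name.split(".")[-1].upper()
--         rule = _EXACT.get(short)
--         if rule is None and "READ_MEDIA_" in short:
--             rule = ("STR", "ds")
--         if rule is None:
--             continue
--         key, mode = rule
--         if mode == "strong":
--             strong = True
--         else:
--             prot = (protection_map.get(short) or "").lower()
--             strong = prot in {"dangerous", "signature"}
--         tags.append((key, strong, short))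
--     return {
--         k: {
--             "strong": list(dict.fromkeys(s for g, st, s in tags if g == k and st)),
--             "weak": list(dict.fromkeys(s for g, st, s in tags if g == k and not st)),
--         }
--         for k in _GROUP_ORDER
--     }
-- ===== Notes on version B (the rewrite author's own statement) =====
-- stated objective: alternative
-- what changed: Replaces the per-permission cascade of membership-test branches mutating the nested dict with a reverse-index table (short name -> (group, strength mode)) that builds a flat tag list in one lookup per permission, after which the group->bucket dict is assembled by per-group comprehensions with ordered dedup.
import Mathlib
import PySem

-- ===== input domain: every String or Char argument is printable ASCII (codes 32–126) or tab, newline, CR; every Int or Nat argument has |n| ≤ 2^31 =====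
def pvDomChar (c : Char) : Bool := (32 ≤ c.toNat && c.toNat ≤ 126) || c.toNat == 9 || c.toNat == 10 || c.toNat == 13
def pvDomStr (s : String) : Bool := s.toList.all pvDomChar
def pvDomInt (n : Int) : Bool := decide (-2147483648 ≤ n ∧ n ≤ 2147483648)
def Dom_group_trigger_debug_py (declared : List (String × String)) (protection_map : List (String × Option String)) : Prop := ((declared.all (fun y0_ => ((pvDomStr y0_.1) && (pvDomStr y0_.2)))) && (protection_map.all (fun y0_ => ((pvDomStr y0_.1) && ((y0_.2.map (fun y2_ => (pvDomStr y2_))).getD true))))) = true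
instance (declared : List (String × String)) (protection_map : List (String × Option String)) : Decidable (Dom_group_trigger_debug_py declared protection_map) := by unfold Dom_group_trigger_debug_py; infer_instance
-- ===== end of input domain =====

-- B replaces A's per-permission branch cascade mutating the nested dict by a reverse-index
-- rule table building a flat tag list, then assembling the buckets per group (alternative).


-- ===== PORT A =====
def pvGroupOrder : List String :=
  ["LOC", "CAM", "MIC", "CNT", "PHN", "SMS", "STR", "BT", "OVR", "NOT", "ADS"]

-- short = name.split(".")[-1].upper(); split? is some (sep ".") and returns a
-- non-empty list, so [-1] is the last element (getLastD never sees its default): exact.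
def pvShort (name : String) : String :=
  PySem.Str.upper (((PySem.Str.split? name ".").getD []).getLastD "")

-- prot = (protection_map.get(short) or "").lower(); is_ds = prot in {"dangerous","signature"}.
-- dict.get on the assoc list is the first matching key; `x or ""` maps both None and "" to "".
def pvIsDS (pm : List (String × Option String)) (short : String) : Bool :=
  let prot := PySem.Str.lower ((((pm.find? (fun p => p.1 == short)).map Prod.snd).getD none).getD "")
  prot == "dangerous" || prot == "signature"

-- out[key] = f(out[key]) on the assoc list: updates the (unique) matching entry in place.
-- The keys of `out` are the distinct _GROUP_ORDER keys (resp. "strong"/"weak"), always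
-- present when _tag runs, so Python's KeyError is unreachable: exact.
def pvModify {α : Type} (d : List (String × α)) (k : String) (f : α → α) : List (String × α) :=
  match d with
  | [] => []
  | (k', v) :: t => if k' == k then (k', f v) :: t else (k', v) :: pvModify t k f

-- _tag(key, short, strong)
def pvTag (out : List (String × List (String × List String))) (key short : String)
    (strong : Bool) : List (String × List (String × List String)) :=
  let bucket := if strong then "strong" else "weak"
  pvModify out key (fun inner =>
    pvModify inner bucket (fun lst => if lst.contains short then lst else lst ++ [short]))

-- the body of A's for-loop after the two locals short/is_ds (here s, ds); the unused
-- local is_framework is dropped.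
def pvCascade (out : List (String × List (String × List String))) (s : String) (ds : Bool) :
    List (String × List (String × List String)) :=
  let out := if s == "ACCESS_BACKGROUND_LOCATION" then pvTag out "LOC" s true else out
  let out := if s == "ACCESS_FINE_LOCATION" || s == "ACCESS_COARSE_LOCATION" || s == "ACCESS_MEDIA_LOCATION" then pvTag out "LOC" s ds else out
  let out := if s == "CAMERA" then pvTag out "CAM" s true else out
  let out := if s == "RECORD_AUDIO" || s == "CAPTURE_AUDIO_OUTPUT" then pvTag out "MIC" s true else out
  let out := if s == "READ_CONTACTS" || s == "WRITE_CONTACTS" || s == "GET_ACCOUNTS" || s == "MANAGE_ACCOUNTS" then pvTag out "CNT" s ds else out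
  let out := if s == "READ_CALL_LOG" || s == "CALL_PHONE" || s == "READ_PHONE_STATE" || s == "READ_PHONE_NUMBERS" || s == "ANSWER_PHONE_CALLS" then pvTag out "PHN" s ds else out
  let out := if s == "SEND_SMS" || s == "RECEIVE_SMS" || s == "READ_SMS" || s == "RECEIVE_MMS" || s == "RECEIVE_WAP_PUSH" then pvTag out "SMS" s ds else out
  let out := if PySem.Str.isIn "READ_MEDIA_" s || (s == "READ_EXTERNAL_STORAGE" || s == "WRITE_EXTERNAL_STORAGE" || s == "MANAGE_EXTERNAL_STORAGE") then pvTag out "STR" s (ds || s == "MANAGE_EXTERNAL_STORAGE") else out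
  let out := if s == "BLUETOOTH_SCAN" || s == "BLUETOOTH_ADVERTISE" || s == "BLUETOOTH_CONNECT" || s == "NEARBY_WIFI_DEVICES" then pvTag out "BT" s ds else out
  let out := if s == "SYSTEM_ALERT_WINDOW" || s == "SYSTEM_OVERLAY_WINDOW" then pvTag out "OVR" s true else out
  let out := if s == "POST_NOTIFICATIONS" || s == "BIND_NOTIFICATION_LISTENER_SERVICE" || s == "ACCESS_NOTIFICATION_POLICY" then pvTag out "NOT" s ds else out
  out

def pvStepA (pm : List (String × Option String))
    (out : List (String × List (String × List String))) (nt : String × String) :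
    List (String × List (String × List String)) :=
  pvCascade out (pvShort nt.1) (pvIsDS pm (pvShort nt.1))

def group_trigger_debug_py (declared : List (String × String))
    (protection_map : List (String × Option String)) :
    List (String × List (String × List String)) :=
  -- out = {k: {"strong": [], "weak": []} for k in _GROUP_ORDER}: fresh distinct keys append in order
  let init := pvGroupOrder.foldl
    (fun d k => d ++ [(k, [("strong", ([] : List String)), ("weak", ([] : List String))])]) []
  declared.foldl (pvStepA protection_map) init

-- ===== PORT B =====
-- _EXACT: short name -> (group, strength mode)
def pvRules : List (String × String × String) :=
  [("ACCESS_BACKGROUND_LOCATION", "LOC", "strong"),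
   ("ACCESS_FINE_LOCATION", "LOC", "ds"),
   ("ACCESS_COARSE_LOCATION", "LOC", "ds"),
   ("ACCESS_MEDIA_LOCATION", "LOC", "ds"),
   ("CAMERA", "CAM", "strong"),
   ("RECORD_AUDIO", "MIC", "strong"),
   ("CAPTURE_AUDIO_OUTPUT", "MIC", "strong"),
   ("READ_CONTACTS", "CNT", "ds"),
   ("WRITE_CONTACTS", "CNT", "ds"),
   ("GET_ACCOUNTS", "CNT", "ds"),
   ("MANAGE_ACCOUNTS", "CNT", "ds"),
   ("READ_CALL_LOG", "PHN", "ds"),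
   ("CALL_PHONE", "PHN", "ds"),
   ("READ_PHONE_STATE", "PHN", "ds"),
   ("READ_PHONE_NUMBERS", "PHN", "ds"),
   ("ANSWER_PHONE_CALLS", "PHN", "ds"),
   ("SEND_SMS", "SMS", "ds"),
   ("RECEIVE_SMS", "SMS", "ds"),
   ("READ_SMS", "SMS", "ds"),
   ("RECEIVE_MMS", "SMS", "ds"),
   ("RECEIVE_WAP_PUSH", "SMS", "ds"),
   ("READ_EXTERNAL_STORAGE", "STR", "ds"),
   ("WRITE_EXTERNAL_STORAGE", "STR", "ds"),
   ("MANAGE_EXTERNAL_STORAGE", "STR", "strong"),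
   ("BLUETOOTH_SCAN", "BT", "ds"),
   ("BLUETOOTH_ADVERTISE", "BT", "ds"),
   ("BLUETOOTH_CONNECT", "BT", "ds"),
   ("NEARBY_WIFI_DEVICES", "BT", "ds"),
   ("SYSTEM_ALERT_WINDOW", "OVR", "strong"),
   ("SYSTEM_OVERLAY_WINDOW", "OVR", "strong"),
   ("POST_NOTIFICATIONS", "NOT", "ds"),
   ("BIND_NOTIFICATION_LISTENER_SERVICE", "NOT", "ds"),
   ("ACCESS_NOTIFICATION_POLICY", "NOT", "ds")]

-- rule = _EXACT.get(short)
def pvRuleOf (short : String) : Option (String × String) :=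
  (pvRules.find? (fun p => p.1 == short)).map Prod.snd

-- rule, after the READ_MEDIA_ substring fallback
def pvResolve (short : String) : Option (String × String) :=
  let rule := pvRuleOf short
  if rule.isNone && PySem.Str.isIn "READ_MEDIA_" short then some ("STR", "ds") else rule

-- one iteration of B's tag-collecting loop on the computed short name
def pvResolveTag (pm : List (String × Option String)) (short : String) :
    Option (String × Bool × String) :=
  match pvResolve short with
  | none => none
  | some (key, mode) =>
    some (key, if mode == "strong" then true else pvIsDS pm short, short)

-- one iteration of B's tag-collecting loop, as the optional tag it appends
def pvTagOf (pm : List (String × Option String)) (nt : String × String) :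
    Option (String × Bool × String) :=
  pvResolveTag pm (pvShort nt.1)

def pvStepB (pm : List (String × Option String)) (acc : List (String × Bool × String))
    (nt : String × String) : List (String × Bool × String) :=
  match pvTagOf pm nt with
  | none => acc
  | some t => acc ++ [t]

-- {"strong": list(dict.fromkeys(...)), "weak": list(dict.fromkeys(...))} for group k
def pvBuckets (tags : List (String × Bool × String)) (k : String) :
    List (String × List String) :=
  [("strong", PySem.List.dedup ((tags.filter (fun t => t.1 == k && t.2.1)).map (fun t => t.2.2))),
   ("weak",   PySem.List.dedup ((tags.filter (fun t => t.1 == k && !t.2.1)).map (fun t => t.2.2)))]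

def group_trigger_debug_py_alt (declared : List (String × String))
    (protection_map : List (String × Option String)) :
    List (String × List (String × List String)) :=
  let tags := declared.foldl (pvStepB protection_map) []
  pvGroupOrder.map (fun k => (k, pvBuckets tags k))

-- ===== PRECONDITION & SPEC =====
def Spec_group_trigger_debug_py (declared : List (String × String)) (protection_map : List (String × Option String)) (out : List (String × List (String × List String))) : Prop := out = group_trigger_debug_py_alt declared protection_map
instance (declared : List (String × String)) (protection_map : List (String × Option String)) (out : List (String × List (String × List String))) : Decidable (Spec_group_trigger_debug_py declared protection_map out) := by unfold Spec_group_trigger_debug_py; infer_instance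

-- ===== CLAIM (what is proved, stated in full; the proofs are below) =====
def Claim_equal_group_trigger_debug_py : Prop := ∀ (declared : List (String × String)) (protection_map : List (String × Option String)), Dom_group_trigger_debug_py declared protection_map → Spec_group_trigger_debug_py declared protection_map (group_trigger_debug_py declared protection_map)

-- ===== LEMMAS AND PROOFS =====

-- B's state viewed as a function of the collected tag list
def pvBuild (ts : List (String × Bool × String)) : List (String × List (String × List String)) :=
  pvGroupOrder.map (fun k => (k, pvBuckets ts k))

theorem pvGroupOrder_nodup : pvGroupOrder.Nodup := by decide

theorem pvFoldB (pm : List (String × Option String)) (l : List (String × String))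
    (acc : List (String × Bool × String)) :
    l.foldl (pvStepB pm) acc = acc ++ l.filterMap (pvTagOf pm) := by
  induction l generalizing acc with
  | nil => simp only [List.foldl_nil, List.filterMap_nil, List.append_nil]
  | cons x t ih =>
    rw [List.foldl_cons, List.filterMap_cons]
    have hstep : pvStepB pm acc x = acc ++ (pvTagOf pm x).toList := by
      unfold pvStepB
      cases pvTagOf pm x <;> simp
    rw [hstep, ih]
    cases pvTagOf pm x <;> simp

-- A's loop body realises exactly the rule that B's table lookup resolves
set_option maxHeartbeats 2000000 in
theorem pvCascade_resolve (out : List (String × List (String × List String))) (s : String)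
    (ds : Bool) :
    pvCascade out s ds =
      match pvResolve s with
      | none => out
      | some (k, mode) => pvTag out k s (if mode == "strong" then true else ds) := by
  unfold pvCascade
  by_cases h1 : s = "ACCESS_BACKGROUND_LOCATION"
  · subst h1; cases ds <;> rfl
  by_cases h2 : s = "ACCESS_FINE_LOCATION"
  · subst h2; cases ds <;> rfl
  by_cases h3 : s = "ACCESS_COARSE_LOCATION"
  · subst h3; cases ds <;> rfl
  by_cases h4 : s = "ACCESS_MEDIA_LOCATION"
  · subst h4; cases ds <;> rfl
  by_cases h5 : s = "CAMERA"
  · subst h5; cases ds <;> rfl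
  by_cases h6 : s = "RECORD_AUDIO"
  · subst h6; cases ds <;> rfl
  by_cases h7 : s = "CAPTURE_AUDIO_OUTPUT"
  · subst h7; cases ds <;> rfl
  by_cases h8 : s = "READ_CONTACTS"
  · subst h8; cases ds <;> rfl
  by_cases h9 : s = "WRITE_CONTACTS"
  · subst h9; cases ds <;> rfl
  by_cases h10 : s = "GET_ACCOUNTS"
  · subst h10; cases ds <;> rfl
  by_cases h11 : s = "MANAGE_ACCOUNTS"
  · subst h11; cases ds <;> rfl
  by_cases h12 : s = "READ_CALL_LOG"
  · subst h12; cases ds <;> rfl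
  by_cases h13 : s = "CALL_PHONE"
  · subst h13; cases ds <;> rfl
  by_cases h14 : s = "READ_PHONE_STATE"
  · subst h14; cases ds <;> rfl
  by_cases h15 : s = "READ_PHONE_NUMBERS"
  · subst h15; cases ds <;> rfl
  by_cases h16 : s = "ANSWER_PHONE_CALLS"
  · subst h16; cases ds <;> rfl
  by_cases h17 : s = "SEND_SMS"
  · subst h17; cases ds <;> rfl
  by_cases h18 : s = "RECEIVE_SMS"
  · subst h18; cases ds <;> rfl
  by_cases h19 : s = "READ_SMS"
  · subst h19; cases ds <;> rfl
  by_cases h20 : s = "RECEIVE_MMS"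
  · subst h20; cases ds <;> rfl
  by_cases h21 : s = "RECEIVE_WAP_PUSH"
  · subst h21; cases ds <;> rfl
  by_cases h22 : s = "READ_EXTERNAL_STORAGE"
  · subst h22; cases ds <;> rfl
  by_cases h23 : s = "WRITE_EXTERNAL_STORAGE"
  · subst h23; cases ds <;> rfl
  by_cases h24 : s = "MANAGE_EXTERNAL_STORAGE"
  · subst h24; cases ds <;> rfl
  by_cases h25 : s = "BLUETOOTH_SCAN"
  · subst h25; cases ds <;> rfl
  by_cases h26 : s = "BLUETOOTH_ADVERTISE"
  · subst h26; cases ds <;> rfl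
  by_cases h27 : s = "BLUETOOTH_CONNECT"
  · subst h27; cases ds <;> rfl
  by_cases h28 : s = "NEARBY_WIFI_DEVICES"
  · subst h28; cases ds <;> rfl
  by_cases h29 : s = "SYSTEM_ALERT_WINDOW"
  · subst h29; cases ds <;> rfl
  by_cases h30 : s = "SYSTEM_OVERLAY_WINDOW"
  · subst h30; cases ds <;> rfl
  by_cases h31 : s = "POST_NOTIFICATIONS"
  · subst h31; cases ds <;> rfl
  by_cases h32 : s = "BIND_NOTIFICATION_LISTENER_SERVICE"
  · subst h32; cases ds <;> rfl
  by_cases h33 : s = "ACCESS_NOTIFICATION_POLICY"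
  · subst h33; cases ds <;> rfl
  have hr : pvRuleOf s = none := by
    unfold pvRuleOf
    rw [Option.map_eq_none_iff, List.find?_eq_none]
    intro p hp
    fin_cases hp <;> simp [Ne.symm h1, Ne.symm h2, Ne.symm h3, Ne.symm h4, Ne.symm h5, Ne.symm h6, Ne.symm h7, Ne.symm h8, Ne.symm h9, Ne.symm h10, Ne.symm h11, Ne.symm h12, Ne.symm h13, Ne.symm h14, Ne.symm h15, Ne.symm h16, Ne.symm h17, Ne.symm h18, Ne.symm h19, Ne.symm h20, Ne.symm h21, Ne.symm h22, Ne.symm h23, Ne.symm h24, Ne.symm h25, Ne.symm h26, Ne.symm h27, Ne.symm h28, Ne.symm h29, Ne.symm h30, Ne.symm h31, Ne.symm h32, Ne.symm h33]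
  by_cases hm : PySem.Chars.isIn ['R','E','A','D','_','M','E','D','I','A','_'] s.toList = true <;>
    simp [pvResolve, hr, pvTag, hm, h1, h2, h3, h4, h5, h6, h7, h8, h9, h10, h11, h12, h13, h14, h15, h16, h17, h18, h19, h20, h21, h22, h23, h24, h25, h26, h27, h28, h29, h30, h31, h32, h33]

theorem pvStepA_eq (pm : List (String × Option String))
    (out : List (String × List (String × List String))) (nt : String × String) :
    pvStepA pm out nt =
      match pvTagOf pm nt with
      | none => out
      | some (k, st, s) => pvTag out k s st := by
  unfold pvStepA pvTagOf pvResolveTag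
  rw [pvCascade_resolve]
  cases pvResolve (pvShort nt.1) with
  | none => rfl
  | some r => obtain ⟨k, mode⟩ := r; rfl

theorem pvRules_group (p : String × String × String) (hp : p ∈ pvRules) :
    p.2.1 ∈ pvGroupOrder := by
  fin_cases hp <;> decide

theorem pvTagOf_mem (pm : List (String × Option String)) (nt : String × String)
    (k : String) (st : Bool) (s : String) (h : pvTagOf pm nt = some (k, st, s)) :
    k ∈ pvGroupOrder := by
  unfold pvTagOf pvResolveTag at h
  cases hr : pvResolve (pvShort nt.1) with
  | none => rw [hr] at h; cases h
  | some r =>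
    obtain ⟨rk, rm⟩ := r
    rw [hr] at h
    simp only [Option.some.injEq, Prod.mk.injEq] at h
    have hk : rk ∈ pvGroupOrder := by
      simp only [pvResolve] at hr
      by_cases hn : ((pvRuleOf (pvShort nt.1)).isNone
          && PySem.Str.isIn "READ_MEDIA_" (pvShort nt.1)) = true
      · rw [if_pos hn] at hr
        cases hr; decide
      · rw [if_neg hn] at hr
        simp only [pvRuleOf] at hr
        cases hfind : List.find? (fun p => p.1 == pvShort nt.1) pvRules with
        | none => rw [hfind] at hr; cases hr
        | some p =>
          rw [hfind] at hr
          simp only [Option.map_some, Option.some.injEq] at hr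
          have h2 := pvRules_group p (List.mem_of_find?_eq_some hfind)
          rw [hr] at h2
          exact h2
    rw [← h.1]
    exact hk

theorem pvModify_map (l : List String) (k : String)
    (f : List (String × List String) → List (String × List String))
    (fv : String → List (String × List String)) (hnd : l.Nodup) (hk : k ∈ l) :
    pvModify (l.map (fun g => (g, fv g))) k f
      = l.map (fun g => (g, if g = k then f (fv g) else fv g)) := by
  induction l with
  | nil => cases hk
  | cons a t ih =>
    simp only [List.map_cons, pvModify]
    by_cases hak : a = k
    · subst hak
      have hne : ∀ g ∈ t, (g, if g = a then f (fv g) else fv g) = (g, fv g) := by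
        intro g hg
        have : ¬ g = a := fun e => (List.nodup_cons.mp hnd).1 (e ▸ hg)
        simp [this]
      simp [List.map_congr_left hne]
    · have hb : (a == k) = false := by simp [hak]
      simp only [hb, Bool.false_eq_true, if_neg hak, reduceIte, List.cons.injEq, true_and]
      exact ih (List.nodup_cons.mp hnd).2
        ((List.mem_cons.mp hk).resolve_left (fun e => hak e.symm))

theorem pvOfList_append (xs : List String) (x : String) :
    PySem.Set.ofList (xs ++ [x])
      = if x ∈ xs then PySem.Set.ofList xs else PySem.Set.ofList xs ++ [x] := by
  simp only [PySem.Set.ofList_eq_foldl, List.foldl_append, List.foldl_cons, List.foldl_nil]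
  by_cases hx : x ∈ xs <;>
    simp [PySem.Set.add, PySem.Set.contains, hx, ← PySem.Set.ofList_eq_foldl,
      PySem.Set.mem_ofList]

theorem pvTag_build (ts : List (String × Bool × String)) (k s : String) (st : Bool)
    (hk : k ∈ pvGroupOrder) :
    pvTag (pvBuild ts) k s st = pvBuild (ts ++ [(k, st, s)]) := by
  unfold pvTag pvBuild
  rw [pvModify_map _ _ _ _ pvGroupOrder_nodup hk]
  refine List.map_congr_left ?_
  intro g hg
  by_cases hgk : g = k
  · subst hgk
    simp only [pvBuckets, List.filter_append, List.map_append]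
    cases st <;>
      simp [pvModify, pvOfList_append]
  · have hb : (k == g) = false := beq_eq_false_iff_ne.mpr (fun e => hgk e.symm)
    simp only [if_neg hgk, pvBuckets, List.filter_append, List.filter_cons, List.filter_nil,
      hb, Bool.false_and, Bool.false_eq_true, reduceIte, List.append_nil]

theorem pvFoldA (pm : List (String × Option String)) (l : List (String × String)) :
    l.foldl (pvStepA pm)
      (pvGroupOrder.foldl
        (fun d k => d ++ [(k, [("strong", ([] : List String)), ("weak", ([] : List String))])]) [])
      = pvBuild (l.filterMap (pvTagOf pm)) := by
  induction l using List.reverseRecOn with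
  | nil => rfl
  | append_singleton t e ih =>
    rw [List.foldl_append, List.foldl_cons, List.foldl_nil, ih, pvStepA_eq]
    cases h : pvTagOf pm e with
    | none => simp [h]
    | some r =>
      obtain ⟨k, st, s⟩ := r
      rw [List.filterMap_append]
      simp only [List.filterMap_cons, h, List.filterMap_nil]
      exact pvTag_build _ _ _ _ (pvTagOf_mem pm e k st s h)

-- ===== VERDICT (by name: the statement is the Claim_ definition above) =====
theorem group_trigger_debug_py_spec : Claim_equal_group_trigger_debug_py := by
  intro declared pm _
  unfold Spec_group_trigger_debug_py group_trigger_debug_py group_trigger_debug_py_alt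
  simp only []
  rw [pvFoldA, pvFoldB]
  rfl
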